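-- pv_equiv track=rewrite | github.com/alaineid/netcli-parse | scripts/organize_templates.py | derive_platform_from_filename
-- ===== SOURCE A (Python) =====
-- def derive_platform_from_filename(filename: str, all_platforms: set[str]) -> str | None:
--     """Find the longest known concrete platform that is a prefix of filename."""
--     stem = filename.replace(".textfsm", "")
--     best = None
--     for p in all_platforms:
--         if stem.startswith(p + "_"):
--             if best is None or len(p) > len(best):
--                 best = p
--     return best
-- ===== SOURCE B (Python) =====
-- def derive_platform_from_filename(filename: str, all_platforms: set[str]) -> str | None:
--     """Find the longest known concrete platform that is a prefix of filename."""
--     stem = filename.replace(".textfsm", "")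
--     if "_" not in stem:
--         return None
--     # Scan underscore positions from the right: the first prefix found in the
--     # platform set is the longest possible match.
--     for i in range(len(stem) - 1, -1, -1):
--         if stem[i] == "_" and stem[:i] in all_platforms:
--             return stem[:i]
--     return None
-- ===== Notes on version B (the rewrite author's own statement) =====
-- stated objective: faster
-- what changed: Instead of testing every platform with startswith (work proportional to the number of platforms), B short-circuits when the stem has no underscore and otherwise scans the stem right-to-left over underscore positions, returning the first prefix found in the platform set (the longest possible match), so the cost is independent of the platform count.
import Mathlib
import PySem

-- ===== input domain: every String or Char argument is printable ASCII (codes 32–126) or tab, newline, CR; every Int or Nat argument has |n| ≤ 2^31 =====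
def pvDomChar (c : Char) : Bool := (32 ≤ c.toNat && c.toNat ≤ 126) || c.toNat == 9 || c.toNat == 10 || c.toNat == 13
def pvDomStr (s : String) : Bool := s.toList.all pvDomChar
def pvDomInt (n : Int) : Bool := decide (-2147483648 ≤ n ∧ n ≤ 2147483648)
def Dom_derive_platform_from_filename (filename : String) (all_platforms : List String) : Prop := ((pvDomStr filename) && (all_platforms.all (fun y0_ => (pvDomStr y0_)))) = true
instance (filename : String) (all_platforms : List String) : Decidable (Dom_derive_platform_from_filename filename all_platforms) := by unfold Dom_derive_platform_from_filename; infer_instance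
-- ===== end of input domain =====

-- B replaces A's scan over all platforms (a startswith test per platform) by a single
-- right-to-left scan over the stem's underscore positions with a set lookup per position;
-- objective: faster (O(#platforms · |stem|) work replaced by per-underscore lookups).

-- ===== PORT A =====
-- one step of A's loop body: if stem.startswith(p + "_") and (best is None or len(p) > len(best)): best = p
def pvAStep (stem : String) (best : Option String) (p : String) : Option String :=
  if PySem.Str.startswith stem (p ++ "_") then
    match best with
    | none => some p
    | some b => if PySem.Str.len b < PySem.Str.len p then some p else some b
  else best

def derive_platform_from_filename (filename : String) (all_platforms : List String) : Option String :=
  let stem := PySem.Str.replace filename ".textfsm" ""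
  all_platforms.foldl (pvAStep stem) none

-- ===== PORT B =====
-- B's loop `for i in range(len(stem)-1, -1, -1)`: n = i+1 means index i is examined next
def pvBFind (s : List Char) (all_platforms : List String) : Nat → Option String
  | 0 => none
  | (i+1) =>
    if s[i]? = some '_' ∧ String.ofList (s.take i) ∈ all_platforms then
      some (String.ofList (s.take i))
    else pvBFind s all_platforms i

def derive_platform_from_filename_alt (filename : String) (all_platforms : List String) : Option String :=
  let stem := PySem.Str.replace filename ".textfsm" ""
  -- fast path: if stem has no underscore, nothing can match ('if "_" not in stem: return None')
  if PySem.Str.isIn "_" stem then pvBFind stem.toList all_platforms stem.toList.length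
  else none

-- ===== PRECONDITION & SPEC =====
def Spec_derive_platform_from_filename (filename : String) (all_platforms : List String) (out : Option String) : Prop := out = derive_platform_from_filename_alt filename all_platforms
instance (filename : String) (all_platforms : List String) (out : Option String) : Decidable (Spec_derive_platform_from_filename filename all_platforms out) := by unfold Spec_derive_platform_from_filename; infer_instance

-- ===== CLAIM (what is proved, stated in full; the proofs are below) =====
def Claim_equal_derive_platform_from_filename : Prop := ∀ (filename : String) (all_platforms : List String), Dom_derive_platform_from_filename filename all_platforms → Spec_derive_platform_from_filename filename all_platforms (derive_platform_from_filename filename all_platforms)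


-- ===== LEMMAS AND PROOFS =====

-- "p followed by '_' is a prefix of s" characterised by take/index
theorem pv_prefix_snoc_iff (xs : List Char) (c : Char) (l : List Char) :
    (xs ++ [c]) <+: l ↔ l.take xs.length = xs ∧ l[xs.length]? = some c := by
  constructor
  · rintro ⟨t, rfl⟩
    rw [List.append_assoc]
    refine ⟨by simp, ?_⟩
    rw [List.getElem?_append_right le_rfl]
    simp
  · rintro ⟨htake, hget⟩
    have hlt : xs.length < l.length := (List.getElem?_eq_some_iff.mp hget).1
    refine ⟨l.drop (xs.length + 1), ?_⟩
    have hdrop : l.drop xs.length = l[xs.length] :: l.drop (xs.length + 1) :=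
      List.drop_eq_getElem_cons hlt
    have hc : l[xs.length] = c := (List.getElem?_eq_some_iff.mp hget).2
    have : l = xs ++ [c] ++ l.drop (xs.length + 1) := by
      calc l = l.take xs.length ++ l.drop xs.length := (List.take_append_drop _ _).symm
        _ = xs ++ (l[xs.length] :: l.drop (xs.length + 1)) := by rw [htake, hdrop]
        _ = xs ++ [c] ++ l.drop (xs.length + 1) := by rw [hc]; simp
    exact this.symm

-- A matches platform q  ⟺  q is the stem's prefix cut at an underscore position
theorem pv_match_iff (stem : String) (q : String) :
    PySem.Str.startswith stem (q ++ "_") = true ↔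
      stem.toList.take q.toList.length = q.toList ∧
        stem.toList[q.toList.length]? = some '_' := by
  have h1 : (q ++ "_").toList = q.toList ++ ['_'] := by simp
  rw [show PySem.Str.startswith stem (q ++ "_")
        = PySem.Chars.startswith stem.toList (q ++ "_").toList from by
        simp [PySem.Str.startswith], h1, PySem.Chars.startswith_iff]
  exact pv_prefix_snoc_iff _ _ _

-- the three shapes of A's loop step
theorem pv_step_none (stem p : String) (hm : PySem.Str.startswith stem (p ++ "_") = true) :
    pvAStep stem none p = some p := by unfold pvAStep; rw [if_pos hm]

theorem pv_step_some (stem b p : String) (hm : PySem.Str.startswith stem (p ++ "_") = true) :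
    pvAStep stem (some b) p =
      if PySem.Str.len b < PySem.Str.len p then some p else some b := by
  unfold pvAStep; rw [if_pos hm]

theorem pv_step_skip (stem : String) (best : Option String) (p : String)
    (hm : ¬ PySem.Str.startswith stem (p ++ "_") = true) :
    pvAStep stem best p = best := by unfold pvAStep; rw [if_neg hm]

-- A's fold, once it holds a value, keeps one at least as long
theorem pv_afold_mono (stem : String) (P : List String) :
    ∀ (y x : String), P.foldl (pvAStep stem) (some y) = some x →
      y.toList.length ≤ x.toList.length := by
  induction P with
  | nil =>
    intro y x h
    simp only [List.foldl_nil] at h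
    exact le_of_eq (by rw [Option.some_inj.mp h])
  | cons p rest ih =>
    intro y x h
    simp only [List.foldl_cons] at h
    by_cases hm : PySem.Str.startswith stem (p ++ "_") = true
    · rw [pv_step_some stem y p hm] at h
      by_cases hlen : PySem.Str.len y < PySem.Str.len p
      · rw [if_pos hlen] at h
        have h2 := ih p x h
        simp only [PySem.Str.len_eq] at hlen
        have h3 : y.toList.length < p.toList.length := by exact_mod_cast hlen
        omega
      · rw [if_neg hlen] at h
        exact ih y x h
    · rw [pv_step_skip stem (some y) p hm] at h
      exact ih y x h

-- if some platform matches, A's fold cannot return none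
theorem pv_afold_ne_none (stem : String) (P : List String) :
    ∀ (best : Option String),
      (∃ q ∈ P, PySem.Str.startswith stem (q ++ "_") = true) ∨ best ≠ none →
      P.foldl (pvAStep stem) best ≠ none := by
  induction P with
  | nil =>
    intro best h
    rcases h with ⟨q, hq, _⟩ | h
    · exact absurd hq List.not_mem_nil
    · simpa using h
  | cons p rest ih =>
    intro best h
    simp only [List.foldl_cons]
    by_cases hm : PySem.Str.startswith stem (p ++ "_") = true
    · have hne : pvAStep stem best p ≠ none := by
        cases best with
        | none => rw [pv_step_none stem p hm]; simp
        | some b => rw [pv_step_some stem b p hm]; split <;> simp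
      exact ih _ (Or.inr hne)
    · rw [pv_step_skip stem best p hm]
      apply ih
      rcases h with ⟨q, hq, hqm⟩ | h
      · rcases List.mem_cons.mp hq with rfl | hq'
        · exact absurd hqm hm
        · exact Or.inl ⟨q, hq', hqm⟩
      · exact Or.inr h

-- if no platform matches, A's fold (from none) returns none
theorem pv_afold_none (stem : String) (P : List String)
    (h : ∀ q ∈ P, ¬ PySem.Str.startswith stem (q ++ "_") = true) :
    P.foldl (pvAStep stem) none = none := by
  induction P with
  | nil => rfl
  | cons p rest ih =>
    simp only [List.foldl_cons]
    rw [pv_step_skip stem none p (h p List.mem_cons_self)]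
    exact ih fun q hq => h q (List.mem_cons_of_mem _ hq)

-- characterisation of A's fold result when it is `some x`
theorem pv_afold_some (stem : String) (P : List String) :
    ∀ (best : Option String) (x : String), P.foldl (pvAStep stem) best = some x →
      (best = some x ∨ (x ∈ P ∧ PySem.Str.startswith stem (x ++ "_") = true)) ∧
        ∀ q ∈ P, PySem.Str.startswith stem (q ++ "_") = true →
          q.toList.length ≤ x.toList.length := by
  induction P with
  | nil =>
    intro best x h
    simp only [List.foldl_nil] at h
    exact ⟨Or.inl h, by simp⟩
  | cons p rest ih =>
    intro best x h
    simp only [List.foldl_cons] at h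
    by_cases hm : PySem.Str.startswith stem (p ++ "_") = true
    · obtain ⟨y, hy, hylen, hysrc⟩ : ∃ y, pvAStep stem best p = some y ∧
          p.toList.length ≤ y.toList.length ∧ (y = p ∨ best = some y) := by
        cases best with
        | none => exact ⟨p, pv_step_none stem p hm, le_rfl, Or.inl rfl⟩
        | some b =>
          rw [pv_step_some stem b p hm]
          by_cases hlen : PySem.Str.len b < PySem.Str.len p
          · rw [if_pos hlen]; exact ⟨p, rfl, le_rfl, Or.inl rfl⟩
          · rw [if_neg hlen]
            refine ⟨b, rfl, ?_, Or.inr rfl⟩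
            simp only [PySem.Str.len_eq, not_lt] at hlen
            exact_mod_cast hlen
      rw [hy] at h
      obtain ⟨hsrc, hmax⟩ := ih (some y) x h
      have hyx : y.toList.length ≤ x.toList.length := pv_afold_mono stem rest y x h
      constructor
      · rcases hsrc with hbx | ⟨hxm, hxs⟩
        · obtain rfl : y = x := Option.some_inj.mp hbx
          rcases hysrc with rfl | hby
          · exact Or.inr ⟨List.mem_cons_self, hm⟩
          · exact Or.inl hby
        · exact Or.inr ⟨List.mem_cons_of_mem _ hxm, hxs⟩
      · intro q hq hqm
        rcases List.mem_cons.mp hq with rfl | hq'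
        · omega
        · exact hmax q hq' hqm
    · rw [pv_step_skip stem best p hm] at h
      obtain ⟨hsrc, hmax⟩ := ih best x h
      refine ⟨?_, ?_⟩
      · rcases hsrc with hbx | ⟨hxm, hxs⟩
        · exact Or.inl hbx
        · exact Or.inr ⟨List.mem_cons_of_mem _ hxm, hxs⟩
      · intro q hq hqm
        rcases List.mem_cons.mp hq with rfl | hq'
        · exact absurd hqm hm
        · exact hmax q hq' hqm

-- the condition B tests at position i
def pvGood (s : List Char) (P : List String) (i : Nat) : Prop :=
  s[i]? = some '_' ∧ String.ofList (s.take i) ∈ P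

theorem pv_bfind_none (s : List Char) (P : List String) :
    ∀ n, (∀ i < n, ¬ pvGood s P i) → pvBFind s P n = none := by
  intro n
  induction n with
  | zero => intro _; rfl
  | succ i ih =>
    intro h
    unfold pvBFind
    split
    · next hc => exact absurd hc (h i (Nat.lt_succ_self i))
    · exact ih (fun j hj => h j (Nat.lt_succ_of_lt hj))

theorem pv_bfind_some_of (s : List Char) (P : List String) :
    ∀ n, (∃ i < n, pvGood s P i) → ∃ x, pvBFind s P n = some x := by
  intro n
  induction n with
  | zero => rintro ⟨i, hi, _⟩; omega
  | succ m ih =>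
    rintro ⟨i, hi, hg⟩
    unfold pvBFind
    split
    · exact ⟨_, rfl⟩
    · next hc =>
      apply ih
      refine ⟨i, ?_, hg⟩
      rcases Nat.lt_succ_iff_lt_or_eq.mp hi with h | rfl
      · exact h
      · exact absurd hg hc

theorem pv_bfind_spec (s : List Char) (P : List String) :
    ∀ n x, pvBFind s P n = some x →
      ∃ i < n, pvGood s P i ∧ x = String.ofList (s.take i) ∧
        ∀ j, i < j → j < n → ¬ pvGood s P j := by
  intro n
  induction n with
  | zero => intro x h; simp [pvBFind] at h
  | succ m ih =>
    intro x h
    unfold pvBFind at h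
    split at h
    · next hc =>
      exact ⟨m, Nat.lt_succ_self m, hc, (Option.some_inj.mp h).symm,
        fun j hj hj' => absurd rfl (by omega : ¬ (0 = 0))⟩
    · next hc =>
      obtain ⟨i, hi, hg, hx, hmax⟩ := ih x h
      refine ⟨i, Nat.lt_succ_of_lt hi, hg, hx, ?_⟩
      intro j hij hj
      rcases Nat.lt_succ_iff_lt_or_eq.mp hj with h' | rfl
      · exact hmax j hij h'
      · exact hc

theorem pv_ofList_toList (x : String) : String.ofList x.toList = x := by simp

-- pvGood i gives a matching platform of length i, and conversely
theorem pv_good_iff (stem : String) (P : List String) (i : Nat) (hi : i < stem.toList.length) :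
    pvGood stem.toList P i ↔
      ∃ q ∈ P, PySem.Str.startswith stem (q ++ "_") = true ∧ q.toList.length = i ∧
        q = String.ofList (stem.toList.take i) := by
  have ht : (String.ofList (stem.toList.take i)).toList = stem.toList.take i := by simp
  have hlen : (stem.toList.take i).length = i := by rw [List.length_take]; omega
  constructor
  · rintro ⟨hund, hmem⟩
    refine ⟨String.ofList (stem.toList.take i), hmem, ?_, ?_, rfl⟩
    · rw [pv_match_iff, ht, hlen]
      exact ⟨rfl, hund⟩
    · rw [ht]; exact hlen
  · rintro ⟨q, hmem, hm, hql, hq⟩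
    rw [pv_match_iff] at hm
    refine ⟨hql ▸ hm.2, ?_⟩
    rw [← hq]
    exact hmem

-- an underscore seen at some index means "_" occurs in the stem
theorem pv_isIn_of_get (stem : String) (i : Nat) (h : stem.toList[i]? = some '_') :
    PySem.Str.isIn "_" stem = true := by
  rw [PySem.Str.isIn_iff_infix]
  have hm : '_' ∈ stem.toList := List.mem_of_getElem? h
  obtain ⟨u, v, huv⟩ := List.mem_iff_append.mp hm
  exact ⟨u, v, by rw [huv]; simp⟩

-- ===== VERDICT (by name: the statement is the Claim_ definition above) =====
theorem derive_platform_from_filename_spec : Claim_equal_derive_platform_from_filename := by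
  intro filename all_platforms _
  unfold Spec_derive_platform_from_filename derive_platform_from_filename
    derive_platform_from_filename_alt
  set stem := PySem.Str.replace filename ".textfsm" "" with hstem
  by_cases hin : PySem.Str.isIn "_" stem = true
  case neg =>
    -- no underscore in the stem: A's loop never fires and B's fast path returns none
    rw [if_neg hin]
    exact pv_afold_none stem all_platforms fun q hq hqm =>
      hin (pv_isIn_of_get stem q.toList.length ((pv_match_iff stem q).mp hqm).2)
  rw [if_pos hin]
  cases hA : all_platforms.foldl (pvAStep stem) none with
  | none =>
    have hnog : ∀ i < stem.toList.length, ¬ pvGood stem.toList all_platforms i := by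
      intro i hi hg
      obtain ⟨q, hqm, hqs, _, _⟩ := (pv_good_iff stem all_platforms i hi).mp hg
      exact pv_afold_ne_none stem all_platforms none (Or.inl ⟨q, hqm, hqs⟩) hA
    exact (pv_bfind_none stem.toList all_platforms stem.toList.length hnog).symm
  | some x =>
    obtain ⟨hsrc, hmax⟩ := pv_afold_some stem all_platforms none x hA
    rcases hsrc with h | ⟨hxP, hxm⟩
    · exact absurd h (by simp)
    rw [pv_match_iff] at hxm
    obtain ⟨htake, hund⟩ := hxm
    have hlt : x.toList.length < stem.toList.length := (List.getElem?_eq_some_iff.mp hund).1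
    have hgood : pvGood stem.toList all_platforms x.toList.length := by
      refine ⟨hund, ?_⟩
      rw [htake, pv_ofList_toList]
      exact hxP
    obtain ⟨y, hy⟩ := pv_bfind_some_of stem.toList all_platforms stem.toList.length
      ⟨x.toList.length, hlt, hgood⟩
    obtain ⟨i, hi, hig, hyi, himax⟩ := pv_bfind_spec stem.toList all_platforms
      stem.toList.length y hy
    have h1 : ¬ i < x.toList.length := fun hle => himax x.toList.length hle hlt hgood
    have h2 : i ≤ x.toList.length := by
      obtain ⟨q, hqP, hqm, hqlen, _⟩ := (pv_good_iff stem all_platforms i hi).mp hig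
      have := hmax q hqP hqm
      omega
    have hieq : i = x.toList.length := by omega
    rw [hy, hyi, hieq, htake, pv_ofList_toList]
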